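-- pv_equiv track=rewrite | github.com/advaitm10/codeForcesSolutions | 650 (Div 3)/cp650-2.py | solve
-- ===== SOURCE A (Python) =====
-- def solve(inList):
--     count= 0
--     moves= 0
--     rList= inList
--     for i in rList:
--         if(i%2!=count%2):
--             for j in range(len(rList)):
--                 if(j!= count and rList[j]%2!= rList[count]%2):
--                     if((j%2!= rList[j]%2) and rList[j]%2==count%2):
--                         temp= rList[j]
--                         rList[j]= rList[count]
--                         rList[count]= temp
--                         moves+=1
--         count+=1
--     count2= 0
--     for k in rList:
--         if(k%2!=count2%2):
--             return -1
--         count2+=1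
--     return moves
-- ===== SOURCE B (Python) =====
-- def solve(inList):
--     odd_on_even = sum(1 for i, x in enumerate(inList) if i % 2 == 0 and x % 2 == 1)
--     even_on_odd = sum(1 for i, x in enumerate(inList) if i % 2 == 1 and x % 2 == 0)
--     return odd_on_even if odd_on_even == even_on_odd else -1
-- ===== Notes on version B (the rewrite author's own statement) =====
-- stated objective: faster
-- what changed: Replaces A's quadratic swap simulation (for every mismatched index, scan the whole array for a swap partner, mutating the list) by one counting pass: the answer is the number of odd values at even indices iff it equals the number of even values at odd indices, else -1.
import Mathlib
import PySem

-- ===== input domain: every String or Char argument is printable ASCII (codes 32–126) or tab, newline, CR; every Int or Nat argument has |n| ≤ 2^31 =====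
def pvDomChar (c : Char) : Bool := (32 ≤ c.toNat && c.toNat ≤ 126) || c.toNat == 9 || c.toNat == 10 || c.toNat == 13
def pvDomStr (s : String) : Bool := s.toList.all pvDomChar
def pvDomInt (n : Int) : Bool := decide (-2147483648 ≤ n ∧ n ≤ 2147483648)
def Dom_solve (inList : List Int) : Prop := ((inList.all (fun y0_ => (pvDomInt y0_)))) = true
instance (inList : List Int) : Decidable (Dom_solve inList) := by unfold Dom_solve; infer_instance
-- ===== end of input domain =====

-- B replaces A's quadratic partner-search swap simulation by one linear counting pass
-- (objective: faster, asymptotic). A swaps elements of inList in place; the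
-- equivalence proved here is about the return value only (B does not mutate).


-- ===== PORT A =====
-- Python's `for i in rList` walks the (mutating) list in lockstep with `count`, so
-- `i` is always the current rList[count]; ported as an index loop over range(len).
-- All indices come from range(len(rList)), hence are in range: `getD _ _ 0` is exact.

-- inner `for j in range(len(rList))` body (state = (rList, moves))
def pvInner (count : Nat) (st : List Int × Int) (j : Nat) : List Int × Int :=
  if j ≠ count ∧ PySem.Int.mod (st.1.getD j 0) 2 ≠ PySem.Int.mod (st.1.getD count 0) 2 then
    if PySem.Int.mod (j : Int) 2 ≠ PySem.Int.mod (st.1.getD j 0) 2 ∧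
        PySem.Int.mod (st.1.getD j 0) 2 = PySem.Int.mod (count : Int) 2 then
      let temp := st.1.getD j 0
      ((st.1.set j (st.1.getD count 0)).set count temp, st.2 + 1)
    else st
  else st

-- outer loop body for index `count`
def pvOuter (n : Nat) (st : List Int × Int) (count : Nat) : List Int × Int :=
  if PySem.Int.mod (st.1.getD count 0) 2 ≠ PySem.Int.mod (count : Int) 2 then
    (List.range n).foldl (pvInner count) st
  else st

-- final `for k in rList` check with early return -1
def pvCheck : List Int → Nat → Int → Int
  | [], _, moves => moves
  | k :: rest, count2, moves =>
    if PySem.Int.mod k 2 ≠ PySem.Int.mod (count2 : Int) 2 then -1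
    else pvCheck rest (count2 + 1) moves

def solve (inList : List Int) : Int :=
  let st := (List.range inList.length).foldl (pvOuter inList.length) (inList, 0)
  pvCheck st.1 0 st.2

-- ===== PORT B =====
def solve_alt (inList : List Int) : Int :=
  let oddOnEven := (PySem.List.enumerate inList).countP
      (fun p => PySem.Int.mod p.1 2 == 0 && PySem.Int.mod p.2 2 == 1)
  let evenOnOdd := (PySem.List.enumerate inList).countP
      (fun p => PySem.Int.mod p.1 2 == 1 && PySem.Int.mod p.2 2 == 0)
  if oddOnEven = evenOnOdd then (oddOnEven : Int) else -1

-- ===== PRECONDITION & SPEC =====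
def Spec_solve (inList : List Int) (out : Int) : Prop := out = solve_alt inList
instance (inList : List Int) (out : Int) : Decidable (Spec_solve inList out) := by unfold Spec_solve; infer_instance

-- ===== CLAIM (what is proved, stated in full; the proofs are below) =====
def Claim_equal_solve : Prop := ∀ (inList : List Int), Dom_solve inList → Spec_solve inList (solve inList)

-- ===== LEMMAS AND PROOFS =====

-- value parity at index k (Python's rList[k] % 2 ∈ {0,1})
def pvVP (l : List Int) (k : Nat) : Int := PySem.Int.mod (l.getD k 0) 2
-- index k is parity-mismatched
def pvM (l : List Int) (k : Nat) : Prop := pvVP l k ≠ ((k % 2 : Nat) : Int)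
-- number of even indices holding odd values / odd indices holding even values
def pvE (l : List Int) : Nat := (List.range l.length).countP (fun k => k % 2 == 0 && pvVP l k == 1)
def pvO (l : List Int) : Nat := (List.range l.length).countP (fun k => k % 2 == 1 && pvVP l k == 0)
-- the swap A performs
def pvSwap (l : List Int) (c j : Nat) : List Int := (l.set j (l.getD c 0)).set c (l.getD j 0)
-- j is a valid swap partner for count c (the conjunction of A's two if-conditions)
abbrev pvPartner (l : List Int) (c j : Nat) : Prop :=
  j ≠ c ∧ pvVP l j ≠ pvVP l c ∧ ((j % 2 : Nat) : Int) ≠ pvVP l j ∧ pvVP l j = ((c % 2 : Nat) : Int)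

lemma pvModCast (m : Nat) : PySem.Int.mod (m : Int) 2 = ((m % 2 : Nat) : Int) := by
  exact_mod_cast PySem.Int.mod_natCast m 2

lemma pvMod2 (x : Int) : PySem.Int.mod x 2 = 0 ∨ PySem.Int.mod x 2 = 1 := by
  have h1 := PySem.Int.mod_nonneg x (b := 2) (by norm_num)
  have h2 := PySem.Int.mod_lt x (b := 2) (by norm_num)
  omega

lemma pvVP2 (l : List Int) (k : Nat) : pvVP l k = 0 ∨ pvVP l k = 1 := pvMod2 _

lemma pvM_iff (l : List Int) (k : Nat) :
    pvM l k ↔ (k % 2 = 0 ∧ pvVP l k = 1) ∨ (k % 2 = 1 ∧ pvVP l k = 0) := by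
  have h := pvVP2 l k
  have hk : k % 2 = 0 ∨ k % 2 = 1 := Nat.mod_two_eq_zero_or_one k
  unfold pvM
  constructor
  · intro hne
    rcases hk with hk | hk <;> rcases h with h | h <;> simp [hk, h] at hne ⊢
  · rintro (⟨hk, hv⟩ | ⟨hk, hv⟩) <;> rw [hk, hv] <;> decide

lemma pvInner_eq (count j : Nat) (st : List Int × Int) :
    pvInner count st j =
      if pvPartner st.1 count j then (pvSwap st.1 count j, st.2 + 1) else st := by
  unfold pvInner pvPartner pvSwap pvVP
  simp only [pvModCast]
  split_ifs <;> first | rfl | tauto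

lemma pvInner_id_of_fixed (count : Nat) (st : List Int × Int)
    (h : pvVP st.1 count = ((count % 2 : Nat) : Int)) (j : Nat) :
    pvInner count st j = st := by
  rw [pvInner_eq, if_neg]
  rintro ⟨_, h2, _, h4⟩
  exact h2 (h4.trans h.symm)

lemma pvInner_fold_id (count : Nat) (st : List Int × Int) (js : List Nat)
    (h : pvVP st.1 count = ((count % 2 : Nat) : Int)) :
    js.foldl (pvInner count) st = st := by
  induction js with
  | nil => rfl
  | cons j js ih => rw [List.foldl_cons, pvInner_id_of_fixed count st h j]; exact ih

lemma pvSwap_length (l : List Int) (c j : Nat) : (pvSwap l c j).length = l.length := by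
  simp [pvSwap]

lemma pvSwap_getD_c (l : List Int) (c j : Nat) (hc : c < l.length) :
    (pvSwap l c j).getD c 0 = l.getD j 0 := by
  unfold pvSwap
  rw [List.getD_eq_getElem?_getD, List.getElem?_set_self (by simpa using hc)]
  rfl

lemma pvSwap_getD_j (l : List Int) (c j : Nat) (hj : j < l.length) (hne : j ≠ c) :
    (pvSwap l c j).getD j 0 = l.getD c 0 := by
  unfold pvSwap
  rw [List.getD_eq_getElem?_getD, List.getElem?_set_ne hne.symm]
  simp [hj, List.getD_eq_getElem?_getD]

lemma pvSwap_getD_other (l : List Int) (c j k : Nat) (h1 : k ≠ c) (h2 : k ≠ j) :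
    (pvSwap l c j).getD k 0 = l.getD k 0 := by
  unfold pvSwap
  rw [List.getD_eq_getElem?_getD, List.getElem?_set_ne (fun h => h1 h.symm),
    List.getElem?_set_ne (fun h => h2 h.symm), ← List.getD_eq_getElem?_getD]

lemma pvInner_fold_spec (count : Nat) (l : List Int) (m : Int) (js : List Nat)
    (hc : count < l.length) (hjs : ∀ j ∈ js, j < l.length) :
    (∃ j ∈ js, pvPartner l count j ∧
        js.foldl (pvInner count) (l, m) = (pvSwap l count j, m + 1))
    ∨ ((∀ j ∈ js, ¬ pvPartner l count j) ∧ js.foldl (pvInner count) (l, m) = (l, m)) := by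
  induction js with
  | nil => exact Or.inr ⟨by simp, rfl⟩
  | cons j js ih =>
    by_cases hp : pvPartner l count j
    · left
      refine ⟨j, List.mem_cons_self, hp, ?_⟩
      rw [List.foldl_cons, pvInner_eq, if_pos hp]
      apply pvInner_fold_id
      show pvVP (pvSwap l count j) count = _
      unfold pvVP
      rw [pvSwap_getD_c l count j hc]
      exact hp.2.2.2
    · rw [List.foldl_cons, pvInner_eq, if_neg hp]
      rcases ih (fun x hx => hjs x (List.mem_cons_of_mem _ hx)) with ⟨j', hj', hpp, heq⟩ | ⟨hno, heq⟩
      · exact Or.inl ⟨j', List.mem_cons_of_mem _ hj', hpp, heq⟩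
      · refine Or.inr ⟨?_, heq⟩
        intro x hx
        rcases List.mem_cons.mp hx with rfl | hx
        · exact hp
        · exact hno x hx

-- generic: flipping exactly one true-position of the predicate drops countP by one
lemma pvCount_drop (js : List Nat) (p q : Nat → Bool) (hnd : js.Nodup) (a : Nat)
    (ha : a ∈ js) (hpa : p a = true) (hqa : q a = false)
    (hagree : ∀ x ∈ js, x ≠ a → q x = p x) :
    js.countP q + 1 = js.countP p := by
  induction js with
  | nil => cases ha
  | cons x js ih =>
    by_cases hxa : x = a
    · subst hxa
      have hx : x ∉ js := (List.nodup_cons.mp hnd).1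
      have hcong : js.countP q = js.countP p :=
        List.countP_congr (fun y hy => by
          rw [hagree y (List.mem_cons_of_mem _ hy) (fun h => hx (h ▸ hy))])
      simp [List.countP_cons, hpa, hqa, hcong]
    · have ha' : a ∈ js := by
        rcases List.mem_cons.mp ha with h | h
        · exact absurd h.symm hxa
        · exact h
      have hqx : q x = p x := hagree x List.mem_cons_self hxa
      have hih := ih (List.nodup_cons.mp hnd).2 ha'
        (fun y hy => hagree y (List.mem_cons_of_mem _ hy))
      simp only [List.countP_cons, hqx]
      omega

-- a successful swap fixes both ends and drops each mismatch count by one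
lemma pvSwap_counts (l : List Int) (c j : Nat) (hc : c < l.length) (hj : j < l.length)
    (hM : pvM l c) (hp : pvPartner l c j) :
    pvE (pvSwap l c j) + 1 = pvE l ∧ pvO (pvSwap l c j) + 1 = pvO l ∧
      ¬ pvM (pvSwap l c j) c ∧ ¬ pvM (pvSwap l c j) j := by
  obtain ⟨hjc, hne, hj2, hjv⟩ := hp
  have hlen := pvSwap_length l c j
  have hvc := pvVP2 l c
  have hvj := pvVP2 l j
  have hkj : j % 2 = 0 ∨ j % 2 = 1 := Nat.mod_two_eq_zero_or_one j
  have hswc : pvVP (pvSwap l c j) c = pvVP l j := by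
    unfold pvVP; rw [pvSwap_getD_c l c j hc]
  have hswj : pvVP (pvSwap l c j) j = pvVP l c := by
    unfold pvVP; rw [pvSwap_getD_j l c j hj hjc]
  have hswo : ∀ k, k ≠ c → k ≠ j → pvVP (pvSwap l c j) k = pvVP l k := by
    intro k h1 h2; unfold pvVP; rw [pvSwap_getD_other l c j k h1 h2]
  unfold pvM at hM
  have hMc : ¬ pvM (pvSwap l c j) c := by
    unfold pvM; rw [hswc, hjv]; simp
  rcases Nat.mod_two_eq_zero_or_one c with hc2 | hc2
  · -- c even: value at c is odd, partner j is odd index with even value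
    rw [hc2] at hM
    simp only [Nat.cast_zero] at hM
    have hvc1 : pvVP l c = 1 := hvc.resolve_left hM
    have hjv0 : pvVP l j = 0 := by rw [hjv, hc2]; simp
    have hj21 : j % 2 = 1 := by
      rcases hkj with h | h
      · exfalso; apply hj2; rw [h, hjv0]; simp
      · exact h
    refine ⟨?_, ?_, hMc, ?_⟩
    · unfold pvE
      rw [hlen]
      exact pvCount_drop (List.range l.length) _ _ (List.nodup_range) c
        (List.mem_range.mpr hc) (by simp [hc2, hvc1]) (by simp [hc2, hswc, hjv0])
        (by
          intro x hx hxc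
          by_cases hxj : x = j
          · subst hxj; simp [hj21]
          · simp [hswo x hxc hxj])
    · unfold pvO
      rw [hlen]
      exact pvCount_drop (List.range l.length) _ _ (List.nodup_range) j
        (List.mem_range.mpr hj) (by simp [hj21, hjv0]) (by simp [hj21, hswj, hvc1])
        (by
          intro x hx hxj
          by_cases hxc : x = c
          · subst hxc; simp [hc2]
          · simp [hswo x hxc hxj])
    · unfold pvM
      rw [hswj, hvc1, hj21]
      simp
  · -- c odd: value at c is even, partner j is even index with odd value
    rw [hc2] at hM
    simp only [Nat.cast_one] at hM
    have hvc0 : pvVP l c = 0 := hvc.resolve_right hM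
    have hjv1 : pvVP l j = 1 := by rw [hjv, hc2]; simp
    have hj20 : j % 2 = 0 := by
      rcases hkj with h | h
      · exact h
      · exfalso; apply hj2; rw [h, hjv1]; simp
    refine ⟨?_, ?_, hMc, ?_⟩
    · unfold pvE
      rw [hlen]
      exact pvCount_drop (List.range l.length) _ _ (List.nodup_range) j
        (List.mem_range.mpr hj) (by simp [hj20, hjv1]) (by simp [hj20, hswj, hvc0])
        (by
          intro x hx hxj
          by_cases hxc : x = c
          · subst hxc; simp [hc2]
          · simp [hswo x hxc hxj])
    · unfold pvO
      rw [hlen]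
      exact pvCount_drop (List.range l.length) _ _ (List.nodup_range) c
        (List.mem_range.mpr hc) (by simp [hc2, hvc0]) (by simp [hc2, hswc, hjv1])
        (by
          intro x hx hxc
          by_cases hxj : x = j
          · subst hxj; simp [hj20]
          · simp [hswo x hxc hxj])
    · unfold pvM
      rw [hswj, hvc0, hj20]
      simp

-- one type of mismatch existing means the corresponding count is positive
lemma pvE_pos (l : List Int) (k : Nat) (hk : k < l.length) (h2 : k % 2 = 0)
    (hv : pvVP l k = 1) : pvE l ≠ 0 := by
  unfold pvE
  rw [Ne, List.countP_eq_zero]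
  push_neg
  exact ⟨k, List.mem_range.mpr hk, by simp [h2, hv]⟩

lemma pvO_pos (l : List Int) (k : Nat) (hk : k < l.length) (h2 : k % 2 = 1)
    (hv : pvVP l k = 0) : pvO l ≠ 0 := by
  unfold pvO
  rw [Ne, List.countP_eq_zero]
  push_neg
  exact ⟨k, List.mem_range.mpr hk, by simp [h2, hv]⟩

lemma pvM_even (l : List Int) (k : Nat) (h2 : k % 2 = 0) (hM : pvM l k) : pvVP l k = 1 := by
  rcases (pvM_iff l k).mp hM with ⟨h, hv⟩ | ⟨h, hv⟩
  · exact hv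
  · omega

lemma pvM_odd (l : List Int) (k : Nat) (h2 : k % 2 = 1) (hM : pvM l k) : pvVP l k = 0 := by
  rcases (pvM_iff l k).mp hM with ⟨h, hv⟩ | ⟨h, hv⟩
  · omega
  · exact hv

-- a mismatched count with a partner means both mismatch counts are positive
lemma pvBoth_pos (l : List Int) (c j : Nat) (hc : c < l.length) (hj : j < l.length)
    (hMc : pvM l c) (hp : pvPartner l c j) : pvE l ≠ 0 ∧ pvO l ≠ 0 := by
  have hMj : pvM l j := Ne.symm hp.2.2.1
  have hpar : c % 2 ≠ j % 2 := by
    intro h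
    apply hp.2.2.1
    rw [← h, hp.2.2.2]
  rcases Nat.mod_two_eq_zero_or_one c with hc2 | hc2
  · have hj2 : j % 2 = 1 := by omega
    exact ⟨pvE_pos l c hc hc2 (pvM_even l c hc2 hMc),
           pvO_pos l j hj hj2 (pvM_odd l j hj2 hMj)⟩
  · have hj2 : j % 2 = 0 := by omega
    exact ⟨pvE_pos l j hj hj2 (pvM_even l j hj2 hMj),
           pvO_pos l c hc hc2 (pvM_odd l c hc2 hMc)⟩

-- loop invariant after processing counts < c
def pvInv (l0 l : List Int) (m : Int) (c : Nat) : Prop :=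
  l.length = l0.length ∧
  (∃ s : Nat, m = (s : Int) ∧ pvE l + s = pvE l0 ∧ pvO l + s = pvO l0) ∧
  (∀ k < c, pvM l k → (k % 2 = 0 → pvO l = 0) ∧ (k % 2 = 1 → pvE l = 0))

lemma pvOuter_step (l0 l : List Int) (m : Int) (c : Nat) (hc : c < l0.length)
    (hInv : pvInv l0 l m c) :
    pvInv l0 (pvOuter l0.length (l, m) c).1 (pvOuter l0.length (l, m) c).2 (c + 1) := by
  obtain ⟨hlen, ⟨s, hm, hEs, hOs⟩, hpre⟩ := hInv
  have hcl : c < l.length := by omega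
  unfold pvOuter
  by_cases hMc : pvM l c
  · rw [if_pos (by simpa [pvModCast, pvM, pvVP] using hMc)]
    have hjs : ∀ j ∈ List.range l0.length, j < l.length := by
      intro j hjm; rw [hlen]; exact List.mem_range.mp hjm
    rcases pvInner_fold_spec c l m (List.range l0.length) hcl hjs with
      ⟨j, hjm, hpart, heq⟩ | ⟨hno, heq⟩
    · rw [heq]
      dsimp only
      have hjl : j < l.length := hjs j hjm
      obtain ⟨hE, hO, hMc', hMj'⟩ := pvSwap_counts l c j hcl hjl hMc hpart
      have hpos := pvBoth_pos l c j hcl hjl hMc hpart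
      have hnopre : ∀ k, k < c → ¬ pvM l k := by
        intro k hk hMk
        obtain ⟨h0, h1⟩ := hpre k (by omega) hMk
        rcases Nat.mod_two_eq_zero_or_one k with hk2 | hk2
        · exact hpos.2 (h0 hk2)
        · exact hpos.1 (h1 hk2)
      have hMj : pvM l j := Ne.symm hpart.2.2.1
      have hcj : c < j := by
        rcases Nat.lt_trichotomy j c with h | h | h
        · exact absurd hMj (hnopre j h)
        · exact absurd h hpart.1
        · exact h
      refine ⟨(pvSwap_length l c j).trans hlen, ⟨s + 1, by push_cast [hm]; ring, by omega, by omega⟩, ?_⟩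
      intro k hk hMk
      exfalso
      rcases Nat.lt_succ_iff_lt_or_eq.mp hk with hk' | rfl
      · apply hnopre k hk'
        have : pvVP (pvSwap l c j) k = pvVP l k := by
          unfold pvVP
          rw [pvSwap_getD_other l c j k (by omega) (by omega)]
        unfold pvM at hMk ⊢
        rwa [this] at hMk
      · exact hMc' hMk
    · rw [heq]
      dsimp only
      refine ⟨hlen, ⟨s, hm, hEs, hOs⟩, ?_⟩
      intro k hk hMk
      rcases Nat.lt_succ_iff_lt_or_eq.mp hk with hk' | rfl
      · exact hpre k hk' hMk
      · constructor
        · intro hk2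
          rw [pvO]
          rw [List.countP_eq_zero]
          intro x hx
          simp only [Bool.and_eq_true, beq_iff_eq, not_and]
          intro hx2 hxv
          have hxl := List.mem_range.mp hx
          apply hno x (by rw [← hlen]; exact List.mem_range.mpr hxl)
          exact ⟨by omega, by rw [hxv, pvM_even l k hk2 hMk]; omega,
            by rw [hxv, hx2]; simp, by rw [hxv, hk2]; simp⟩
        · intro hk2
          rw [pvE]
          rw [List.countP_eq_zero]
          intro x hx
          simp only [Bool.and_eq_true, beq_iff_eq, not_and]
          intro hx2 hxv
          have hxl := List.mem_range.mp hx
          apply hno x (by rw [← hlen]; exact List.mem_range.mpr hxl)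
          exact ⟨by omega, by rw [hxv, pvM_odd l k hk2 hMk]; omega,
            by rw [hxv, hx2]; simp, by rw [hxv, hk2]; simp⟩
  · rw [if_neg (by simpa [pvModCast, pvM, pvVP] using hMc)]
    refine ⟨hlen, ⟨s, hm, hEs, hOs⟩, ?_⟩
    intro k hk hMk
    rcases Nat.lt_succ_iff_lt_or_eq.mp hk with hk' | rfl
    · exact hpre k hk' hMk
    · exact absurd hMk hMc

lemma pvOuter_fold (l0 : List Int) (c : Nat) (hc : c ≤ l0.length) :
    pvInv l0 ((List.range c).foldl (pvOuter l0.length) (l0, 0)).1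
      ((List.range c).foldl (pvOuter l0.length) (l0, 0)).2 c := by
  induction c with
  | zero => exact ⟨rfl, ⟨0, by simp⟩, by omega⟩
  | succ c ih =>
    rw [List.range_succ, List.foldl_append, List.foldl_cons, List.foldl_nil]
    have h := pvOuter_step l0 _ _ c (by omega) (ih (by omega))
    exact h

lemma pvCheck_ok (l : List Int) (c : Nat) (m : Int)
    (h : ∀ k < l.length, PySem.Int.mod (l.getD k 0) 2 = (((c + k) % 2 : Nat) : Int)) :
    pvCheck l c m = m := by
  induction l generalizing c with
  | nil => rfl
  | cons x rest ih =>
    have h0 := h 0 (by simp)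
    simp at h0
    unfold pvCheck
    rw [if_neg (by simp [h0])]
    apply ih
    intro k hk
    have := h (k + 1) (by simpa using Nat.succ_lt_succ hk)
    simpa [Nat.add_comm, Nat.add_left_comm, Nat.add_assoc] using this

lemma pvCheck_bad (l : List Int) (c : Nat) (m : Int) (k : Nat) (hk : k < l.length)
    (h : PySem.Int.mod (l.getD k 0) 2 ≠ (((c + k) % 2 : Nat) : Int)) :
    pvCheck l c m = -1 := by
  induction l generalizing c k with
  | nil => simp at hk
  | cons x rest ih =>
    unfold pvCheck
    by_cases hx : PySem.Int.mod x 2 ≠ PySem.Int.mod (c : Int) 2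
    · rw [if_pos hx]
    · rw [if_neg hx]
      push_neg at hx
      cases k with
      | zero =>
        exfalso
        apply h
        simpa [PySem.Int.mod_natCast] using hx
      | succ k =>
        apply ih (c + 1) k (by simpa using Nat.lt_of_succ_lt_succ hk)
        simpa [Nat.add_comm, Nat.add_left_comm, Nat.add_assoc] using h

-- B's two enumerate-counts are pvE / pvO
lemma pvB_counts (l : List Int) :
    (PySem.List.enumerate l).countP
        (fun p => PySem.Int.mod p.1 2 == 0 && PySem.Int.mod p.2 2 == 1) = pvE l ∧
    (PySem.List.enumerate l).countP
        (fun p => PySem.Int.mod p.1 2 == 1 && PySem.Int.mod p.2 2 == 0) = pvO l := by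
  constructor <;>
  · rw [PySem.List.enumerate_eq_map_pyRange l 0]
    rw [show PySem.List.len l = (l.length : Int) by simp [PySem.List.len]]
    rw [PySem.List.pyRange_zero_natCast, List.map_map, List.countP_map]
    first
      | unfold pvE
      | unfold pvO
    unfold pvVP
    apply List.countP_congr
    intro k hk
    simp [Function.comp, PySem.List.pyGetD_natCast]
    omega

lemma pvMain (inList : List Int) : solve inList = solve_alt inList := by
  unfold solve solve_alt
  dsimp only
  rw [(pvB_counts inList).1, (pvB_counts inList).2]
  obtain ⟨hlen, ⟨s, hm, hEs, hOs⟩, hpre⟩ := pvOuter_fold inList inList.length le_rfl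
  set st := (List.range inList.length).foldl (pvOuter inList.length) (inList, 0) with hst
  by_cases hex : ∃ k, k < st.1.length ∧ pvM st.1 k
  · obtain ⟨k, hk, hMk⟩ := hex
    have hA : pvCheck st.1 0 st.2 = -1 := by
      apply pvCheck_bad st.1 0 st.2 k hk
      simpa [pvM, pvVP] using hMk
    have hEO : pvE inList ≠ pvO inList := by
      obtain ⟨h0, h1⟩ := hpre k (by omega) hMk
      rcases Nat.mod_two_eq_zero_or_one k with hk2 | hk2
      · have hO0 : pvO st.1 = 0 := h0 hk2
        have hEpos : pvE st.1 ≠ 0 := pvE_pos st.1 k hk hk2 (pvM_even st.1 k hk2 hMk)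
        omega
      · have hE0 : pvE st.1 = 0 := h1 hk2
        have hOpos : pvO st.1 ≠ 0 := pvO_pos st.1 k hk hk2 (pvM_odd st.1 k hk2 hMk)
        omega
    rw [hA, if_neg hEO]
  · push_neg at hex
    have hA : pvCheck st.1 0 st.2 = st.2 := by
      apply pvCheck_ok
      intro k hk
      have := hex k hk
      unfold pvM pvVP at this
      push_neg at this
      simpa using this
    have hE0 : pvE st.1 = 0 := by
      rw [pvE, List.countP_eq_zero]
      intro x hx
      simp only [Bool.and_eq_true, beq_iff_eq, not_and]
      intro hx2 hxv
      exact absurd ((pvM_iff st.1 x).mpr (Or.inl ⟨hx2, hxv⟩)) (hex x (List.mem_range.mp hx))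
    have hO0 : pvO st.1 = 0 := by
      rw [pvO, List.countP_eq_zero]
      intro x hx
      simp only [Bool.and_eq_true, beq_iff_eq, not_and]
      intro hx2 hxv
      exact absurd ((pvM_iff st.1 x).mpr (Or.inr ⟨hx2, hxv⟩)) (hex x (List.mem_range.mp hx))
    rw [hA, if_pos (by omega), hm]
    congr 1
    omega

-- ===== VERDICT (by name: the statement is the Claim_ definition above) =====
theorem solve_spec : Claim_equal_solve := by
  intro inList _
  exact pvMain inList
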